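-- pv_equiv track=rewrite | github.com/minimaxir/reactionrnn | reactionrnn/reactionrnn.py | textgenrnn_encode_training
-- ===== SOURCE A (Python) =====
-- def textgenrnn_encode_training(text, meta_token='<s>', maxlen=40):
--     '''
--     Encodes a list of texts into a list of texts, and the next character
--     in those texts.
--     '''
--
--     text_aug = [meta_token] + list(text) + [meta_token]
--     chars = []
--     next_char = []
--
--     for i in range(len(text_aug) - 1):
--         chars.append(text_aug[0:i + 1][-maxlen:])
--         next_char.append(text_aug[i + 1])
--
--     return chars, next_char
-- ===== SOURCE B (Python) =====
-- def textgenrnn_encode_training(text, meta_token='<s>', maxlen=40):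
--     '''
--     Encodes a list of texts into a list of texts, and the next character
--     in those texts.
--     '''
--
--     chars = []
--     next_char = []
--     window = []
--     prev = meta_token
--     for ch in list(text) + [meta_token]:
--         window.append(prev)
--         if len(window) > maxlen:
--             window.pop(0)
--         chars.append(window[:])
--         next_char.append(ch)
--         prev = ch
--     return chars, next_char
-- ===== Notes on version B (the rewrite author's own statement) =====
-- stated objective: alternative
-- what changed: B replaces A's per-step rebuild-and-reslice of the growing prefix with a single pass that maintains a bounded FIFO window incrementally (append the previous token, pop the front when the window exceeds maxlen, snapshot it), so no prefix copies are ever made.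
-- intended difference: For maxlen <= 0 with len(text)+1 > -maxlen, A's slice [-maxlen:] accidentally returns the whole prefix (maxlen=0) or the prefix minus its first -maxlen chars (maxlen<0); B returns the empty window, the intended meaning of a non-positive window size. — e.g. on textgenrnn_encode_training("", "<s>", 0): A returns ([["<s>"]], ["<s>"]), B returns ([[]], ["<s>"])
import Mathlib
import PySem

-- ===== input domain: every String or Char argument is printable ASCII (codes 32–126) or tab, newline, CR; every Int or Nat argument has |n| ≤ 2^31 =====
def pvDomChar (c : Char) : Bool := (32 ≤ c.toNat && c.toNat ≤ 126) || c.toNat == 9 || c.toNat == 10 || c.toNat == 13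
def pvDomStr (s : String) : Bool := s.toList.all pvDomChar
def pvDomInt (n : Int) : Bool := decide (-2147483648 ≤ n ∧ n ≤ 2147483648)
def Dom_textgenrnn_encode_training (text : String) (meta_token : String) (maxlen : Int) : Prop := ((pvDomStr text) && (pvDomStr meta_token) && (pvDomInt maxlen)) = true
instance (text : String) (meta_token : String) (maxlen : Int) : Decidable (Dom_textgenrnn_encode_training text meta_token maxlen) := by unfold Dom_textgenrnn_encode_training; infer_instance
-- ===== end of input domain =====

-- B maintains a bounded FIFO window incrementally in one pass (append prev, pop the front
-- when the window exceeds maxlen, snapshot it), instead of A's loop that rebuilds and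
-- re-slices the growing prefix at every step; for maxlen <= 0 (region D_) B returns empty
-- windows where A's slice quirk returns prefixes.


-- ===== PORT A =====
-- literal port of A: text_aug = [meta_token] + list(text) + [meta_token]; loop i in
-- range(len(text_aug)-1) appending text_aug[0:i+1][-maxlen:] and text_aug[i+1].
def textgenrnn_encode_training (text : String) (meta_token : String) (maxlen : Int) : List (List String) × List String :=
  let text_aug : List String := [meta_token] ++ text.toList.map (fun c => String.ofList [c]) ++ [meta_token]
  (PySem.List.pyRange 0 ((text_aug.length : Int) - 1) 1).foldl
    (fun acc i =>
      (acc.1 ++ [PySem.List.slice (PySem.List.slice text_aug (some 0) (some (i + 1))) (some (-maxlen)) none],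
       acc.2 ++ [PySem.List.pyGetD text_aug (i + 1) ""]))  -- text_aug[i+1]; i+1 is always in range inside the loop
    ([], [])

-- ===== PORT B =====
-- one step of B's loop body: window.append(prev); if len(window) > maxlen: window.pop(0);
-- chars.append(window[:]); next_char.append(ch); prev = ch.  window.pop(0) on the (always
-- nonempty after the append) window is exactly List.tail.
def pvStepB (maxlen : Int) (acc : List (List String) × List String × List String × String)
    (ch : String) : List (List String) × List String × List String × String :=
  let w := acc.2.2.1 ++ [acc.2.2.2]
  let w := if maxlen < (w.length : Int) then w.tail else w
  (acc.1 ++ [w], acc.2.1 ++ [ch], w, ch)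

-- literal port of B: single pass over list(text) + [meta_token] with state
-- (chars, next_char, window, prev), initial window = [] and prev = meta_token.
def textgenrnn_encode_training_alt (text : String) (meta_token : String) (maxlen : Int) : List (List String) × List String :=
  let rest : List String := text.toList.map (fun c => String.ofList [c]) ++ [meta_token]
  let r := rest.foldl (pvStepB maxlen) ([], [], [], meta_token)
  (r.1, r.2.1)

-- ===== PRECONDITION & SPEC =====
-- For maxlen <= 0 with len(text)+1 > -maxlen, A's slice [-maxlen:] accidentally returns the
-- whole prefix (maxlen=0) or the prefix minus its first -maxlen chars (maxlen<0); B returns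
-- the empty window, the intended meaning of a non-positive window size.
def D_textgenrnn_encode_training (text : String) (meta_token : String) (maxlen : Int) : Prop :=
  maxlen ≤ 0 ∧ -maxlen < PySem.Str.len text + 1
instance (text : String) (meta_token : String) (maxlen : Int) : Decidable (D_textgenrnn_encode_training text meta_token maxlen) := by unfold D_textgenrnn_encode_training; infer_instance

def Spec_textgenrnn_encode_training (text : String) (meta_token : String) (maxlen : Int) (out : List (List String) × List String) : Prop := ¬ D_textgenrnn_encode_training text meta_token maxlen → out = textgenrnn_encode_training_alt text meta_token maxlen
instance (text : String) (meta_token : String) (maxlen : Int) (out : List (List String) × List String) : Decidable (Spec_textgenrnn_encode_training text meta_token maxlen out) := by unfold Spec_textgenrnn_encode_training; infer_instance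

def pvDiffWitness_textgenrnn_encode_training : String × String × Int := ("", "<s>", 0)
def pvDiffWitnessOut_textgenrnn_encode_training : (List (List String) × List String) × (List (List String) × List String) :=
  (([["<s>"]], ["<s>"]), ([[]], ["<s>"]))

-- ===== CLAIM (what is proved, stated in full; the proofs are below) =====
def Claim_unchanged_textgenrnn_encode_training : Prop := ∀ (text : String) (meta_token : String) (maxlen : Int), Dom_textgenrnn_encode_training text meta_token maxlen → Spec_textgenrnn_encode_training text meta_token maxlen (textgenrnn_encode_training text meta_token maxlen)
def Claim_exact_textgenrnn_encode_training : Prop := ∀ (text : String) (meta_token : String) (maxlen : Int), Dom_textgenrnn_encode_training text meta_token maxlen → D_textgenrnn_encode_training text meta_token maxlen → textgenrnn_encode_training text meta_token maxlen ≠ textgenrnn_encode_training_alt text meta_token maxlen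
def Claim_changed_textgenrnn_encode_training : Prop := Dom_textgenrnn_encode_training (pvDiffWitness_textgenrnn_encode_training.1) (pvDiffWitness_textgenrnn_encode_training.2.1) (pvDiffWitness_textgenrnn_encode_training.2.2) ∧ D_textgenrnn_encode_training (pvDiffWitness_textgenrnn_encode_training.1) (pvDiffWitness_textgenrnn_encode_training.2.1) (pvDiffWitness_textgenrnn_encode_training.2.2) ∧ textgenrnn_encode_training (pvDiffWitness_textgenrnn_encode_training.1) (pvDiffWitness_textgenrnn_encode_training.2.1) (pvDiffWitness_textgenrnn_encode_training.2.2) = pvDiffWitnessOut_textgenrnn_encode_training.1 ∧ textgenrnn_encode_training_alt (pvDiffWitness_textgenrnn_encode_training.1) (pvDiffWitness_textgenrnn_encode_training.2.1) (pvDiffWitness_textgenrnn_encode_training.2.2) = pvDiffWitnessOut_textgenrnn_encode_training.2 ∧ pvDiffWitnessOut_textgenrnn_encode_training.1 ≠ pvDiffWitnessOut_textgenrnn_encode_training.2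

-- ===== LEMMAS AND PROOFS =====

-- the value of B's window after k appends: the last maxlen elements of ta.take k (empty if maxlen ≤ 0)
def pvWin (ta : List String) (maxlen : Int) (k : Nat) : List String :=
  if maxlen ≤ 0 then [] else (ta.take k).drop (k - maxlen.toNat)

theorem pvWinStep (ta : List String) (maxlen : Int) (k : Nat) (hk : k < ta.length) :
    (if maxlen < ((pvWin ta maxlen k ++ [ta.getD k ""]).length : Int)
     then (pvWin ta maxlen k ++ [ta.getD k ""]).tail
     else pvWin ta maxlen k ++ [ta.getD k ""]) = pvWin ta maxlen (k + 1) := by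
  by_cases hm : maxlen ≤ 0
  · have h0 : pvWin ta maxlen k = [] := by simp [pvWin, hm]
    rw [h0]
    simp only [List.nil_append, List.length_cons, List.length_nil]
    rw [if_pos (by omega)]
    simp [pvWin, hm]
  · have htk : ta.take (k+1) = ta.take k ++ [ta.getD k ""] := by
      rw [List.getD_eq_getElem ta "" hk, ← List.take_concat_get' ta k hk]
    have hw : pvWin ta maxlen k ++ [ta.getD k ""] = (ta.take (k+1)).drop (k - maxlen.toNat) := by
      simp only [pvWin, if_neg hm, htk]
      rw [List.drop_append_of_le_length (by simp; omega)]
    have hlen : ((ta.take (k+1)).drop (k - maxlen.toNat)).length = (k+1) - (k - maxlen.toNat) := by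
      simp; omega
    rw [hw, hlen]
    by_cases hkm : maxlen.toNat ≤ k
    · rw [if_pos (by omega), List.tail_drop]
      simp only [pvWin, if_neg hm]
      congr 1; omega
    · rw [if_neg (by omega)]
      simp only [pvWin, if_neg hm]
      congr 1; omega

theorem pvLoopB (ta : List String) (maxlen : Int) :
    ∀ (l : List String) (k : Nat) (C : List (List String)) (N : List String),
    k + 1 + l.length = ta.length → l = ta.drop (k + 1) →
    List.foldl (pvStepB maxlen) (C, N, pvWin ta maxlen k, ta.getD k "") l
      = (C ++ (List.range l.length).map (fun j => pvWin ta maxlen (k + 1 + j)),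
         N ++ l,
         pvWin ta maxlen (ta.length - 1), ta.getD (ta.length - 1) "") := by
  intro l
  induction l with
  | nil =>
    intro k C N hlen _
    simp only [List.length_nil] at hlen
    simp only [List.foldl_nil, List.length_nil, List.range_zero, List.map_nil,
      List.append_nil]
    have hk : k = ta.length - 1 := by omega
    subst hk; rfl
  | cons ch l' ih =>
    intro k C N hlen hdrop
    have hch : ch = ta.getD (k+1) "" := by
      have h0 : (ta.drop (k+1))[0]? = some ch := by rw [← hdrop]; rfl
      rw [List.getElem?_drop] at h0
      simp only [Nat.add_zero] at h0
      rw [List.getD_eq_getElem?_getD, h0]; rfl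
    have hklt : k < ta.length := by simp at hlen; omega
    have hstep : pvStepB maxlen (C, N, pvWin ta maxlen k, ta.getD k "") ch
        = (C ++ [pvWin ta maxlen (k+1)], N ++ [ch], pvWin ta maxlen (k+1), ch) := by
      simp only [pvStepB]
      rw [pvWinStep ta maxlen k hklt]
    have hdrop' : l' = ta.drop (k+2) := by
      have := congrArg List.tail hdrop
      simpa [List.tail_drop] using this
    rw [List.foldl_cons, hstep, hch]
    rw [ih (k+1) (C ++ [pvWin ta maxlen (k+1)]) (N ++ [ta.getD (k+1) ""])
        (by simp at hlen ⊢; omega) hdrop']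
    refine Prod.ext ?_ (Prod.ext (by simp) rfl)
    simp only [List.length_cons]
    rw [List.range_succ_eq_map]
    simp only [List.map_cons, List.map_map, List.append_assoc, List.cons_append, List.nil_append]
    congr 1
    congr 1
    apply List.map_congr_left
    intro j _
    simp only [Function.comp]
    congr 1
    omega

-- B's port computes (map pvWin, ta.drop 1)
theorem pvAltEq (text meta_token : String) (maxlen : Int) :
    textgenrnn_encode_training_alt text meta_token maxlen
      = ((List.range (([meta_token] ++ text.toList.map (fun c => String.ofList [c]) ++ [meta_token]).length - 1)).map
           (fun j => pvWin ([meta_token] ++ text.toList.map (fun c => String.ofList [c]) ++ [meta_token]) maxlen (1 + j)),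
         ([meta_token] ++ text.toList.map (fun c => String.ofList [c]) ++ [meta_token]).drop 1) := by
  simp only [textgenrnn_encode_training_alt]
  have hrest : text.toList.map (fun c => String.ofList [c]) ++ [meta_token]
      = ([meta_token] ++ text.toList.map (fun c => String.ofList [c]) ++ [meta_token]).drop 1 := by
    simp
  have hstate : (([], [], [], meta_token) : List (List String) × List String × List String × String)
      = ([], [], pvWin ([meta_token] ++ text.toList.map (fun c => String.ofList [c]) ++ [meta_token]) maxlen 0,
         ([meta_token] ++ text.toList.map (fun c => String.ofList [c]) ++ [meta_token]).getD 0 "") := by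
    simp [pvWin]
  rw [hrest, hstate]
  rw [pvLoopB _ maxlen _ 0 [] [] (by simp; omega) rfl]
  simp

theorem pvPairLoop {α β : Type} (fA : Int → α) (fN : Int → β) (b : Int) :
    (PySem.List.pyRange 0 b 1).foldl (fun acc i => (acc.1 ++ [fA i], acc.2 ++ [fN i])) (([],[]) : List α × List β)
      = ((PySem.List.pyRange 0 b 1).map fA, (PySem.List.pyRange 0 b 1).map fN) := by
  rw [PySem.List.foldl_prod_mk (f := fun acc i => acc ++ [fA i]) (g := fun acc i => acc ++ [fN i])]
  rw [PySem.List.foldl_append_singleton_eq_map, PySem.List.foldl_append_singleton_eq_map]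
  simp

theorem pvNext (ta : List String) :
    (PySem.List.pyRange 0 ((ta.length:Int) - 1) 1).map (fun i => PySem.List.pyGetD ta (i+1) "")
      = ta.drop 1 := by
  have h1 : (PySem.List.pyRange 1 (ta.length:Int) 1).map (fun j => PySem.List.pyGetD ta j "") = ta.drop 1 := by
    have := PySem.List.map_pyGetD_pyRange' ta "" (a := 1) (by omega)
    simpa using this
  rw [← h1, PySem.List.pyRange_one, PySem.List.pyRange_one]
  simp only [List.map_map]
  have : ((ta.length:Int) - 1 - 0).toNat = ((ta.length:Int) - 1).toNat := by omega
  rw [this]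
  apply List.map_congr_left
  intro k _
  simp only [Function.comp]
  norm_num [add_comm]

-- A's window at step i equals pvWin (i+1), outside D_
theorem pvChars (ta : List String) (maxlen i : Int) (h0 : 0 ≤ i) (hi : i < (ta.length:Int) - 1)
    (h : 1 ≤ maxlen ∨ (ta.length:Int) - 1 ≤ -maxlen) :
    PySem.List.slice (PySem.List.slice ta (some 0) (some (i + 1))) (some (-maxlen)) none
      = pvWin ta maxlen (i + 1).toNat := by
  have hP : PySem.List.slice ta (some 0) (some (i+1)) = ta.take (i+1).toNat := by
    rw [PySem.List.slice_toNat ta (by omega) (by omega)]; simp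
  rw [hP]
  rcases h with hm | hm
  · have hk : -maxlen = -(maxlen.toNat : Int) := by omega
    rw [hk, PySem.List.slice_from_neg_natCast _ maxlen.toNat (by omega)]
    have hlen : (ta.take (i+1).toNat).length = min (i+1).toNat ta.length := by simp
    rw [hlen, pvWin, if_neg (by omega)]
    congr 1
    omega
  · rw [PySem.List.slice_from _ (a := -maxlen) (by omega)]
    rw [pvWin, if_pos (by omega)]
    rw [List.drop_eq_nil_iff]
    simp; omega

-- ===== VERDICT (by name: the statement is the Claim_ definition above) =====
theorem textgenrnn_encode_training_spec : Claim_unchanged_textgenrnn_encode_training := by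
  intro text meta_token maxlen _ hnD
  rw [pvAltEq]
  simp only [textgenrnn_encode_training]
  rw [pvPairLoop, pvNext]
  set ta : List String := [meta_token] ++ text.toList.map (fun c => String.ofList [c]) ++ [meta_token] with hta
  have hlen : ta.length = text.toList.length + 2 := by simp [hta]
  have hside : 1 ≤ maxlen ∨ (ta.length:Int) - 1 ≤ -maxlen := by
    unfold D_textgenrnn_encode_training at hnD
    rw [PySem.Str.len_eq] at hnD
    push Not at hnD
    by_cases hm : maxlen ≤ 0
    · exact Or.inr (by have := hnD hm; omega)
    · exact Or.inl (by omega)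
  refine Prod.ext ?_ rfl
  rw [PySem.List.pyRange_one]
  simp only [List.map_map]
  have he : ((ta.length:Int) - 1 - 0).toNat = ta.length - 1 := by omega
  rw [he]
  apply List.map_congr_left
  intro k hk
  rw [List.mem_range] at hk
  simp only [Function.comp]
  rw [pvChars ta maxlen (0 + (k:Int)) (by omega) (by omega) hside]
  congr 1; omega

theorem textgenrnn_encode_training_changed : Claim_changed_textgenrnn_encode_training := by
  unfold Claim_changed_textgenrnn_encode_training; decide

theorem textgenrnn_encode_training_tight : Claim_exact_textgenrnn_encode_training := by
  intro text meta_token maxlen _ hD heq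
  unfold D_textgenrnn_encode_training at hD
  rw [PySem.Str.len_eq] at hD
  rw [pvAltEq] at heq
  simp only [textgenrnn_encode_training] at heq
  rw [pvPairLoop, pvNext] at heq
  set ta : List String := [meta_token] ++ text.toList.map (fun c => String.ofList [c]) ++ [meta_token] with hta
  have hlen : ta.length = text.toList.length + 2 := by simp [hta]
  have h1 := congrArg (fun p => p.1[ta.length - 2]?) heq
  simp only at h1
  have hb : ((ta.length:Int) - 1) = (((ta.length - 1 : Nat) : Int)) := by omega
  rw [hb] at h1
  rw [PySem.List.getElem?_map_pyRange_zero _ _ _ (by omega)] at h1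
  rw [List.getElem?_map, List.getElem?_range (by omega)] at h1
  simp only [Option.map_some, Option.some.injEq] at h1
  have hW : pvWin ta maxlen (1 + (ta.length - 2)) = [] := by
    rw [pvWin, if_pos hD.1]
  rw [hW] at h1
  have hP : PySem.List.slice ta (some 0) (some (((ta.length - 2 : Nat) : Int) + 1)) = ta.take (ta.length - 1) := by
    rw [PySem.List.slice_toNat ta (by omega) (by omega)]
    simp only [List.drop_zero, Int.toNat_zero]
    congr 1; omega
  rw [hP] at h1
  rw [PySem.List.slice_from _ (a := -maxlen) (by omega)] at h1
  have hL := congrArg List.length h1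
  simp only [List.length_drop, List.length_take, List.length_nil] at hL
  omega
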